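-- pv_equiv track=rewrite | github.com/damned/blueprinta | blueprinter/blueprint/text_splitter.py | split_after_minimum
-- ===== SOURCE A (Python) =====
-- def split_after_minimum(text, minimum=6):
--     lines = []
--     word = ''
--     for c in text:
--         if c == ' ':
--             if len(word) >= minimum:
--                 lines.append(word)
--                 word = ''
--             else:
--                 word += c
--         else:
--             word += c
--
--     if len(word) > 0:
--         lines.append(word)
--
--     return lines
-- ===== SOURCE B (Python) =====
-- def split_after_minimum(text, minimum=6):
--     tokens = text.split(' ')
--     lines = []
--     chunk = tokens[0]
--     for token in tokens[1:]:
--         if len(chunk) >= minimum: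
--             lines.append(chunk)
--             chunk = token
--         else:
--             chunk = chunk + ' ' + token
--     if len(chunk) > 0:
--         lines.append(chunk)
--     return lines
-- ===== Notes on version B (the rewrite author's own statement) =====
-- stated objective: alternative
-- what changed: B splits the text into space-separated tokens first and then greedily regroups tokens into chunks, instead of A's single character-by-character scan with an accumulating word buffer.
import Mathlib
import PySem

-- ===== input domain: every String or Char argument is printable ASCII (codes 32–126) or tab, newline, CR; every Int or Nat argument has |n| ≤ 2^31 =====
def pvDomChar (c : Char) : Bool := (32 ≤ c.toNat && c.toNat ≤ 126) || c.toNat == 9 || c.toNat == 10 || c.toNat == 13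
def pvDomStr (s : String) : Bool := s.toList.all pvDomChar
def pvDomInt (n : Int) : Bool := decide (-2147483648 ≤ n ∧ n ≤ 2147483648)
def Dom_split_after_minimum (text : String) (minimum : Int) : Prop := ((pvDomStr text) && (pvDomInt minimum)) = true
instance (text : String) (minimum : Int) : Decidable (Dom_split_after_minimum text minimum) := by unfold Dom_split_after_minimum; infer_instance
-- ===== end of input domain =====

-- B replaces A's character-by-character scan with split-on-space then greedy token regrouping; same O(n) cost, different decomposition (objective: alternative).

-- ===== PORT A =====
-- one step of A's `for c in text` loop over the state (lines, word)
def pvAStep (minimum : Int) (st : List (List Char) × List Char) (c : Char) :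
    List (List Char) × List Char :=
  if c = ' ' then
    if (st.2.length : Int) ≥ minimum then (st.1 ++ [st.2], []) else (st.1, st.2 ++ [c])
  else (st.1, st.2 ++ [c])

def split_after_minimum (text : String) (minimum : Int) : List String :=
  let st := text.toList.foldl (pvAStep minimum) ([], [])
  (if st.2.length > 0 then st.1 ++ [st.2] else st.1).map String.ofList

-- ===== PORT B =====
-- hand port of Python's text.split(' ') (single-char separator, empty pieces kept); exact for that call
def pvSplitSp : List Char → List (List Char)
  | [] => [[]]
  | c :: cs =>
    if c = ' ' then [] :: pvSplitSp cs
    else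
      match pvSplitSp cs with
      | [] => [[c]]   -- unreachable: pvSplitSp never returns []
      | t :: ts => (c :: t) :: ts

-- one step of B's `for token in tokens[1:]` loop over the state (lines, chunk)
def pvBStep (minimum : Int) (st : List (List Char) × List Char) (tok : List Char) :
    List (List Char) × List Char :=
  if (st.2.length : Int) ≥ minimum then (st.1 ++ [st.2], tok)
  else (st.1, st.2 ++ ' ' :: tok)

def split_after_minimum_alt (text : String) (minimum : Int) : List String :=
  let tokens := pvSplitSp text.toList
  let st := tokens.tail.foldl (pvBStep minimum) ([], tokens.headI)
  (if st.2.length > 0 then st.1 ++ [st.2] else st.1).map String.ofList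

-- ===== PRECONDITION & SPEC =====
def Spec_split_after_minimum (text : String) (minimum : Int) (out : List String) : Prop := out = split_after_minimum_alt text minimum
instance (text : String) (minimum : Int) (out : List String) : Decidable (Spec_split_after_minimum text minimum out) := by unfold Spec_split_after_minimum; infer_instance

-- ===== CLAIM (what is proved, stated in full; the proofs are below) =====
def Claim_equal_split_after_minimum : Prop := ∀ (text : String) (minimum : Int), Dom_split_after_minimum text minimum → Spec_split_after_minimum text minimum (split_after_minimum text minimum)

-- ===== LEMMAS AND PROOFS =====

theorem pvSplitSp_ne_nil : ∀ (cs : List Char), pvSplitSp cs ≠ []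
  | [] => by simp [pvSplitSp]
  | c :: cs => by
      simp only [pvSplitSp]
      split
      · simp
      · cases h : pvSplitSp cs <;> simp

-- main invariant: A's fold over the characters, started at (lines, word), finishes like
-- B's fold over the split tokens with the first token glued onto word
theorem pvMain (minimum : Int) (cs : List Char) :
    ∀ (lines : List (List Char)) (word : List Char),
      cs.foldl (pvAStep minimum) (lines, word)
        = (pvSplitSp cs).tail.foldl (pvBStep minimum) (lines, word ++ (pvSplitSp cs).headI) := by
  induction cs with
  | nil => intro lines word; simp [pvSplitSp]
  | cons c cs ih =>
    intro lines word
    by_cases hc : c = ' '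
    · subst hc
      simp only [List.foldl_cons, pvSplitSp, List.headI, pvAStep]
      rcases h : pvSplitSp cs with _ | ⟨t, ts⟩
      · exact absurd h (pvSplitSp_ne_nil cs)
      · by_cases hlen : (word.length : Int) ≥ minimum
        · simp only [if_pos hlen]
          have := ih (lines ++ [word]) []
          simpa [h, pvBStep, hlen] using this
        · simp only [if_neg hlen]
          have := ih lines (word ++ [' '])
          simpa [h, pvBStep, hlen, List.append_assoc] using this
    · simp only [List.foldl_cons, pvAStep, if_neg hc]
      rcases h : pvSplitSp cs with _ | ⟨t, ts⟩
      · exact absurd h (pvSplitSp_ne_nil cs)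
      · have := ih lines (word ++ [c])
        simp only [pvSplitSp, if_neg hc, h, List.tail_cons, List.headI] at this ⊢
        simpa [List.append_assoc] using this

-- ===== VERDICT (by name: the statement is the Claim_ definition above) =====
theorem split_after_minimum_spec : Claim_equal_split_after_minimum := by
  intro text minimum _
  unfold Spec_split_after_minimum split_after_minimum split_after_minimum_alt
  simp only [pvMain minimum text.toList [] [], List.nil_append]
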